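-- pv_equiv track=rewrite | github.com/aniketmondal1210/GFG-Chronicles | Difficulty: Basic/1s Complement/1's_complement.py | onesComplement
-- ===== SOURCE A (Python) =====
-- def onesComplement(S,N):
--     # code here
--     result = []
--     for bit in S:
--         if bit == '1':
--             result.append('0')
--         else:
--             result.append('1')
--     return ''.join(result)
-- ===== SOURCE B (Python) =====
-- def onesComplement(S, N):
--     # Split on the '1' characters; every other character becomes a '1',
--     # and the removed separators come back as '0's.
--     return '0'.join('1' * len(p) for p in S.split('1'))
-- ===== Notes on version B (the rewrite author's own statement) =====
-- stated objective: faster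
-- what changed: Replaces A's per-character flip loop with split-on-'1' plus bulk string operations: each run of non-'1' characters becomes a run of '1's ('1'*len(p)) and the removed separators come back as '0' join separators.
import Mathlib
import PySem

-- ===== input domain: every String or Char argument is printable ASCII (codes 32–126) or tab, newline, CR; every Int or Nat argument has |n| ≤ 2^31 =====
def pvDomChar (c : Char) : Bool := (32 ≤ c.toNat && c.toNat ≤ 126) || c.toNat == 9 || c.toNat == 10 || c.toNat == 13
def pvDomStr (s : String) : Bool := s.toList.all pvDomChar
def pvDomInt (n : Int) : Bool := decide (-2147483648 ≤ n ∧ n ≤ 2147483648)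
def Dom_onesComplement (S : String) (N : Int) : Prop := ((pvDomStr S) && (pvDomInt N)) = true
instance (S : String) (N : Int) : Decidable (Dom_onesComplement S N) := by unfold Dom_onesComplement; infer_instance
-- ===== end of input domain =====

-- B replaces A's per-character flip loop by splitting on '1' and rebuilding: runs of non-'1' chars become runs of '1's, joined by '0's.

-- ===== PORT A =====
-- result = []; for bit in S: append '0' if bit == '1' else '1'; return ''.join(result)
def onesComplement (S : String) (N : Int) : String :=
  let result : List String :=
    S.toList.foldl (fun r bit => if bit == '1' then r ++ ["0"] else r ++ ["1"]) []
  PySem.Str.join "" result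

-- ===== PORT B =====
-- return '0'.join('1' * len(p) for p in S.split('1'))
def onesComplement_alt (S : String) (N : Int) : String :=
  String.mk (PySem.Chars.join ['0']
    ((PySem.Chars.splitOn S.toList ['1']).map (fun p => List.replicate p.length '1')))

-- ===== PRECONDITION & SPEC =====
def Spec_onesComplement (S : String) (N : Int) (out : String) : Prop := out = onesComplement_alt S N
instance (S : String) (N : Int) (out : String) : Decidable (Spec_onesComplement S N out) := by unfold Spec_onesComplement; infer_instance

-- ===== CLAIM (what is proved, stated in full; the proofs are below) =====
def Claim_equal_onesComplement : Prop := ∀ (S : String) (N : Int), Dom_onesComplement S N → Spec_onesComplement S N (onesComplement S N)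

-- ===== LEMMAS AND PROOFS =====
def pvFlip (c : Char) : Char := if c == '1' then '0' else '1'

def pvConsHead (x : List Char) : List (List Char) → List (List Char)
  | [] => [x]
  | h :: t => (x ++ h) :: t

def pvSplit1 : List Char → List (List Char)
  | [] => [[]]
  | c :: r => if c == '1' then [] :: pvSplit1 r else pvConsHead [c] (pvSplit1 r)

theorem pv_toList_mk (l : List Char) : (String.mk l).toList = l :=
  (String.ofList_eq.mp rfl).symm

theorem pvSplit1_ne_nil (l : List Char) : pvSplit1 l ≠ [] := by
  cases l with
  | nil => simp [pvSplit1]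
  | cons c r =>
    simp only [pvSplit1]
    split
    · simp
    · cases h : pvSplit1 r <;> simp [pvConsHead]

theorem pv_go_eq (l : List Char) : ∀ (fuel : Nat) (cur : List Char) (acc : List (List Char)),
    l.length ≤ fuel →
    PySem.Chars.splitOn.go ['1'] fuel l cur acc
      = acc.reverse ++ pvConsHead cur.reverse (pvSplit1 l) := by
  induction l with
  | nil =>
    intro fuel cur acc _
    cases fuel <;> simp [PySem.Chars.splitOn.go, pvSplit1, pvConsHead]
  | cons c rest ih =>
    intro fuel cur acc hle
    cases fuel with
    | zero => simp at hle
    | succ f =>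
      have hf : rest.length ≤ f := by simpa using hle
      rw [show PySem.Chars.splitOn.go ['1'] (f+1) (c::rest) cur acc
            = if List.isPrefixOf ['1'] (c::rest) then
                PySem.Chars.splitOn.go ['1'] f rest [] (cur.reverse :: acc)
              else PySem.Chars.splitOn.go ['1'] f rest (c :: cur) acc from rfl]
      obtain ⟨h, t, hht⟩ : ∃ h t, pvSplit1 rest = h :: t := by
        cases hh : pvSplit1 rest with
        | nil => exact absurd hh (pvSplit1_ne_nil rest)
        | cons h t => exact ⟨h, t, rfl⟩
      by_cases hc : c = '1'
      · subst hc
        have hpre : List.isPrefixOf ['1'] ('1' :: rest) = true := by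
          simp [List.isPrefixOf]
        rw [hpre, if_pos rfl, ih f [] (cur.reverse :: acc) hf]
        simp [pvSplit1, hht, pvConsHead]
      · have hpre : List.isPrefixOf ['1'] (c :: rest) = false := by
          simp [List.isPrefixOf]
          exact fun hh => hc hh.symm
        rw [hpre, if_neg (by simp), ih f (c :: cur) acc hf]
        simp [pvSplit1, hc, hht, pvConsHead]

theorem pv_splitOn_eq (l : List Char) : PySem.Chars.splitOn l ['1'] = pvSplit1 l := by
  unfold PySem.Chars.splitOn
  rw [pv_go_eq l (l.length + 1) [] [] (Nat.le_succ _)]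
  obtain ⟨h, t, hht⟩ : ∃ h t, pvSplit1 l = h :: t := by
    cases hh : pvSplit1 l with
    | nil => exact absurd hh (pvSplit1_ne_nil l)
    | cons h t => exact ⟨h, t, rfl⟩
  simp [hht, pvConsHead]

theorem pv_join_cons_head (sep : List Char) (a : Char) (x : List Char) (rest : List (List Char)) :
    PySem.Chars.join sep ((a :: x) :: rest) = a :: PySem.Chars.join sep (x :: rest) := by
  cases rest with
  | nil => simp [PySem.Chars.join_singleton]
  | cons y t => simp [PySem.Chars.join_cons_cons]

theorem pv_join_split (l : List Char) :
    PySem.Chars.join ['0'] ((pvSplit1 l).map (fun p => List.replicate p.length '1'))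
      = l.map pvFlip := by
  induction l with
  | nil => simp [pvSplit1, PySem.Chars.join_singleton]
  | cons c r ih =>
    obtain ⟨h, t, hht⟩ : ∃ h t, pvSplit1 r = h :: t := by
      cases hh : pvSplit1 r with
      | nil => exact absurd hh (pvSplit1_ne_nil r)
      | cons h t => exact ⟨h, t, rfl⟩
    by_cases hc : (c == '1') = true
    · simp only [pvSplit1, hc, if_true, List.map_cons, List.length_nil,
        List.replicate_zero, hht]
      rw [PySem.Chars.join_cons_cons]
      simp only [List.nil_append, List.singleton_append]
      rw [show List.replicate h.length '1' :: List.map (fun p => List.replicate p.length '1') t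
            = List.map (fun p => List.replicate p.length '1') (pvSplit1 r) by rw [hht]; rfl, ih]
      have hc' : c = '1' := by simpa using hc
      simp [pvFlip, hc']
    · simp only [pvSplit1, hc, Bool.false_eq_true, if_false, hht, pvConsHead,
        List.singleton_append, List.map_cons, List.length_cons, List.replicate_succ]
      rw [pv_join_cons_head]
      rw [show List.replicate h.length '1' :: List.map (fun p => List.replicate p.length '1') t
            = List.map (fun p => List.replicate p.length '1') (pvSplit1 r) by rw [hht]; rfl, ih]
      have hc' : c ≠ '1' := by simpa using hc
      simp [pvFlip, hc']

theorem pv_foldl_map (l : List Char) (acc : List String) :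
    l.foldl (fun r bit => if bit == '1' then r ++ ["0"] else r ++ ["1"]) acc
      = acc ++ l.map (fun c => String.mk [pvFlip c]) := by
  induction l generalizing acc with
  | nil => simp
  | cons c rest ih =>
    simp only [List.foldl_cons, List.map_cons, ih, pvFlip]
    split <;> simp <;> rfl

-- ===== VERDICT (by name: the statement is the Claim_ definition above) =====
theorem onesComplement_spec : Claim_equal_onesComplement := by
  intro S N _
  show onesComplement S N = onesComplement_alt S N
  unfold onesComplement onesComplement_alt
  simp only [pv_foldl_map, List.nil_append, pv_splitOn_eq, pv_join_split]
  apply String.toList_injective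
  simp only [PySem.Str.toList_join, List.map_map, Function.comp_def, pv_toList_mk]
  rw [show (fun c => [pvFlip c]) = (fun x => [x]) ∘ pvFlip from rfl, ← List.map_map]
  exact PySem.Chars.join_nil_singletons _
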